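-- pv_equiv track=rewrite | github.com/cmbenello/141-discussion | solutions/assessment_sols.py | str_04_shift_digits_wrap
-- ===== SOURCE A (Python) =====
-- def str_04_shift_digits_wrap(s: str, k: int) -> str:
--     out = []
--     k = k % 10
--     for ch in s:
--         if ch.isdigit():
--             d = ord(ch) - ord('0')
--             nd = (d + k) % 10
--             out.append(chr(nd + ord('0')))
--         else:
--             out.append(ch)
--     return ''.join(out)
-- ===== SOURCE B (Python) =====
-- def str_04_shift_digits_wrap(s: str, k: int) -> str:
--     k = k % 10
--     table = str.maketrans({ch: chr((ord(ch) - 48 + k) % 10 + 48) for ch in '0123456789'})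
--     return s.translate(table)
-- ===== Notes on version B (the rewrite author's own statement) =====
-- stated objective: idiomatic
-- what changed: Replaces the explicit per-character loop with isdigit/ord branching by a ten-entry translation table built once (str.maketrans over the digits) applied in a single s.translate pass.
import Mathlib
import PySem

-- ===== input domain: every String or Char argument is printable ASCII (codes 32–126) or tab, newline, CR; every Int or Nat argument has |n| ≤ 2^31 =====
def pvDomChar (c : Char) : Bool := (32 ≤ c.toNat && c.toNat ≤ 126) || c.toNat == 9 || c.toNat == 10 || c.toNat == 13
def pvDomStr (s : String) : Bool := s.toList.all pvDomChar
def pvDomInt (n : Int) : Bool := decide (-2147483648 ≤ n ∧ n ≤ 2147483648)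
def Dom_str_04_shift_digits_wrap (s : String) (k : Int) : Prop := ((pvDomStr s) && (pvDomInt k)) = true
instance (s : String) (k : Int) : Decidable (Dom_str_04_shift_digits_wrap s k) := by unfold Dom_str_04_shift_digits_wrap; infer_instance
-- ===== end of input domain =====

-- B replaces A's per-character isdigit/ord-arithmetic loop by a ten-entry digit translation
-- table built once (str.maketrans) and applied in a single translate pass; same O(n) cost.


-- ===== PORT A =====
-- literal port: k = k % 10; loop over the characters appending either the shifted digit or
-- the character unchanged; ''.join(out) becomes String.mk of the accumulated char list
def str_04_shift_digits_wrap (s : String) (k : Int) : String :=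
  let km := PySem.Int.mod k 10
  let out := s.toList.foldl (fun out ch =>
    if PySem.Chars.isdigit ch then
      let d : Int := (ch.toNat : Int) - 48
      let nd := PySem.Int.mod (d + km) 10
      out ++ [Char.ofNat (nd + 48).toNat]
    else
      out ++ [ch]) []
  String.mk out

-- ===== PORT B =====
-- literal port of Source B: build the maketrans table (a dict from digit char to shifted digit
-- char, in digit order), then translate = map each character through the table, defaulting
-- to the character itself when it has no entry
def str_04_shift_digits_wrap_alt (s : String) (k : Int) : String :=
  let km := PySem.Int.mod k 10
  let table := (['0','1','2','3','4','5','6','7','8','9']).foldl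
    (fun d ch => d.insert ch (Char.ofNat (PySem.Int.mod ((ch.toNat : Int) - 48 + km) 10 + 48).toNat))
    PySem.Dict.empty
  String.mk (s.toList.map (fun c => ((table.get? c).getD c)))

-- ===== PRECONDITION & SPEC =====
def Spec_str_04_shift_digits_wrap (s : String) (k : Int) (out : String) : Prop := out = str_04_shift_digits_wrap_alt s k
instance (s : String) (k : Int) (out : String) : Decidable (Spec_str_04_shift_digits_wrap s k out) := by unfold Spec_str_04_shift_digits_wrap; infer_instance

-- ===== CLAIM (what is proved, stated in full; the proofs are below) =====
def Claim_equal_str_04_shift_digits_wrap : Prop := ∀ (s : String) (k : Int), Dom_str_04_shift_digits_wrap s k → Spec_str_04_shift_digits_wrap s k (str_04_shift_digits_wrap s k)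

-- ===== LEMMAS AND PROOFS =====

-- a true (within-ASCII Python-exact) digit is one of the ten digit characters
lemma pv_digit_mem (c : Char) (h : PySem.Chars.isdigit c = true) :
    c = '0' ∨ c = '1' ∨ c = '2' ∨ c = '3' ∨ c = '4' ∨ c = '5' ∨ c = '6' ∨ c = '7' ∨ c = '8' ∨ c = '9' := by
  simp only [PySem.Chars.isdigit, Bool.and_eq_true, decide_eq_true_eq, Char.le_def] at h
  have hc : c = Char.ofNat c.toNat := (Char.ofNat_toNat c).symm
  have h1 : 48 ≤ c.toNat := h.1
  have h2 : c.toNat ≤ 57 := h.2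
  set n := c.toNat with hn
  interval_cases n <;> (rw [hc]; decide)

-- A's loop body as an append of one element, folding a per-character function
lemma pv_foldA (f g : Char → Char) (p : Char → Bool) (xs : List Char) (acc : List Char) :
    xs.foldl (fun out ch => if p ch then out ++ [f ch] else out ++ [g ch]) acc
      = acc ++ xs.map (fun ch => if p ch then f ch else g ch) := by
  induction xs generalizing acc with
  | nil => simp
  | cons x xs ih => simp only [List.foldl, List.map]; rw [ih]; split <;> simp

-- per-character agreement between A's branch and B's table lookup
lemma pv_per_char (km : Int) (c : Char) :
    (if PySem.Chars.isdigit c then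
        Char.ofNat (PySem.Int.mod (((c.toNat : Int) - 48) + km) 10 + 48).toNat
      else c)
      = (((['0','1','2','3','4','5','6','7','8','9']).foldl
          (fun d ch => d.insert ch (Char.ofNat (PySem.Int.mod ((ch.toNat : Int) - 48 + km) 10 + 48).toNat))
          PySem.Dict.empty).get? c).getD c := by
  by_cases h : PySem.Chars.isdigit c = true
  · rcases pv_digit_mem c h with rfl|rfl|rfl|rfl|rfl|rfl|rfl|rfl|rfl|rfl <;>
      simp [List.foldl, PySem.Dict.get?_insert, PySem.Chars.isdigit]
  · have hne : ∀ ch : Char, PySem.Chars.isdigit ch = true → ¬ (c = ch) := by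
      intro ch hch hEq; exact h (hEq ▸ hch)
    simp [List.foldl, PySem.Dict.get?_insert, PySem.Dict.get?_empty, h,
      hne '0' (by decide), hne '1' (by decide), hne '2' (by decide), hne '3' (by decide),
      hne '4' (by decide), hne '5' (by decide), hne '6' (by decide), hne '7' (by decide),
      hne '8' (by decide), hne '9' (by decide)]

-- ===== VERDICT (by name: the statement is the Claim_ definition above) =====
set_option maxHeartbeats 1000000 in
theorem str_04_shift_digits_wrap_spec : Claim_equal_str_04_shift_digits_wrap := by
  intro s k _
  unfold Spec_str_04_shift_digits_wrap str_04_shift_digits_wrap str_04_shift_digits_wrap_alt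
  simp only [pv_foldA, List.nil_append]
  exact congrArg String.mk (List.map_congr_left (fun c _ => pv_per_char (PySem.Int.mod k 10) c))
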